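-- pv_equiv track=rewrite | github.com/aimasteracc/tree-sitter-analyzer | tests/format_testing/specification_compliance_tests.py | _validate_parameters_format
-- ===== SOURCE A (Python) =====
-- def _validate_parameters_format(parameters: str) -> bool:
--     """Validate parameters format: param1:type1;param2:type2"""
--     if not parameters.strip():
--         return True
--
--     # Split by semicolon
--     params = parameters.split(";")
--
--     for param in params:
--         param = param.strip()
--         if ":" not in param:
--             return False
--
--         parts = param.split(":")
--         if len(parts) != 2:
--             return False
--
--         name, type_name = parts
--         if not name.strip() or not type_name.strip():
--             return False
--
--     return True
-- ===== SOURCE B (Python) =====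
-- def _validate_parameters_format(parameters: str) -> bool:
--     """Single left-to-right character scan: no split/strip, one pass over the string."""
--     all_ok = True
--     seen_nonspace = False
--     colons = 0
--     left = False
--     right = False
--     for ch in parameters:
--         if ch == ";":
--             seen_nonspace = True
--             if not (colons == 1 and left and right):
--                 all_ok = False
--             colons, left, right = 0, False, False
--         elif ch == ":":
--             seen_nonspace = True
--             colons += 1
--         elif not ch.isspace():
--             seen_nonspace = True
--             if colons == 0:
--                 left = True
--             else:
--                 right = True
--     if not (colons == 1 and left and right):
--         all_ok = False
--     return all_ok or not seen_nonspace
-- ===== Notes on version B (the rewrite author's own statement) =====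
-- stated objective: alternative
-- what changed: A strips the whole string, splits on ';', and re-parses each piece with strip/'in'/split(':')/length checks; B makes a single left-to-right pass over the characters, maintaining (colons, nonspace-before-colon, nonspace-after-colon) per segment and validating at each ';' boundary, building no intermediate lists.
import Mathlib
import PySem

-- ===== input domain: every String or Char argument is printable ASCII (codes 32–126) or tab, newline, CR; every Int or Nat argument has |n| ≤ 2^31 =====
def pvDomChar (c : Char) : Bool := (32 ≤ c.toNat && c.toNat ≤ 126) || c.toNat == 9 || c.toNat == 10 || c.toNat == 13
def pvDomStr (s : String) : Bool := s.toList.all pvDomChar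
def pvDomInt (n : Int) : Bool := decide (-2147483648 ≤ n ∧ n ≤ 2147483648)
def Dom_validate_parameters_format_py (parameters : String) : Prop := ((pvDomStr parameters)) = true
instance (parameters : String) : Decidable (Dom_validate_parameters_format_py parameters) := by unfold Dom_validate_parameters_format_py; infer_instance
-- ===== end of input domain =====

-- B replaces A's split/strip/per-part parsing by a single left-to-right character scan over the string (alternative decomposition; no intermediate lists).

-- ===== PORT A =====
-- the `for param in params` loop of A, with its early returns
def pyLoopA : List String → Bool
  | [] => true
  | p :: rest =>
    let param := PySem.Str.strip p
    if PySem.Str.isIn ":" param = false then false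
    else
      -- param.split(":"): sep ":" ≠ "" so Str.split? is `some`; getD [] is exact here
      let parts := (PySem.Str.split? param ":").getD []
      if parts.length ≠ 2 then false
      else
        match parts with
        | [name, type_name] =>
          if PySem.Str.strip name = "" || PySem.Str.strip type_name = "" then false
          else pyLoopA rest
        | _ => false

def validate_parameters_format_py (parameters : String) : Bool :=
  if PySem.Str.strip parameters = "" then true
  else
    -- parameters.split(";"): sep ";" ≠ "" so Str.split? is `some`; getD [] is exact here
    pyLoopA ((PySem.Str.split? parameters ";").getD [])

-- ===== PORT B =====
-- Source B's per-segment check `colons == 1 and left and right`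
def altSegOk (cols : Nat) (lft rgt : Bool) : Bool := cols == 1 && lft && rgt

-- one step of Source B's loop body; state = (all_ok, seen_nonspace, colons, left, right)
def altStep : (Bool × Bool × Nat × Bool × Bool) → Char → (Bool × Bool × Nat × Bool × Bool)
  | (ok, ns, cols, lft, rgt), ch =>
    if ch = ';' then (ok && altSegOk cols lft rgt, true, 0, false, false)
    else if ch = ':' then (ok, true, cols + 1, lft, rgt)
    else if !(PySem.Chars.isspace ch) then
      (ok, true, cols, (if cols == 0 then true else lft), (if cols == 0 then rgt else true))
    else (ok, ns, cols, lft, rgt)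

def validate_parameters_format_py_alt (parameters : String) : Bool :=
  match parameters.toList.foldl altStep (true, false, 0, false, false) with
  | (ok, ns, cols, lft, rgt) => (ok && altSegOk cols lft rgt) || !ns

-- ===== PRECONDITION & SPEC =====
def Spec_validate_parameters_format_py (parameters : String) (out : Bool) : Prop := out = validate_parameters_format_py_alt parameters
instance (parameters : String) (out : Bool) : Decidable (Spec_validate_parameters_format_py parameters out) := by unfold Spec_validate_parameters_format_py; infer_instance

-- ===== CLAIM (what is proved, stated in full; the proofs are below) =====
def Claim_equal_validate_parameters_format_py : Prop := ∀ (parameters : String), Dom_validate_parameters_format_py parameters → Spec_validate_parameters_format_py parameters (validate_parameters_format_py parameters)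

-- ===== LEMMAS AND PROOFS =====

def split1 (c : Char) : List Char → List (List Char)
  | [] => [[]]
  | a :: l => if a = c then [] :: split1 c l else (split1 c l).modifyHead (a :: ·)

theorem split1_ne_nil (c : Char) (l : List Char) : split1 c l ≠ [] := by
  induction l with
  | nil => simp [split1]
  | cons a l ih =>
    by_cases h : a = c <;> simp [split1, h]
    cases hs : split1 c l with
    | nil => exact absurd hs ih
    | cons x xs => simp

theorem go_spec (c : Char) : ∀ (fuel : Nat) (l : List Char) (cur : List Char) (acc : List (List Char)),
    l.length < fuel →
    PySem.Chars.splitOn.go [c] fuel l cur acc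
      = acc.reverse ++ (split1 c l).modifyHead (cur.reverse ++ ·) := by
  intro fuel
  induction fuel with
  | zero => intro l cur acc h; omega
  | succ f ih =>
    intro l cur acc h
    cases l with
    | nil => simp [PySem.Chars.splitOn.go, split1]
    | cons a rest =>
      rw [PySem.Chars.splitOn.go]
      by_cases hac : a = c
      · subst hac
        have hpre : [a].isPrefixOf (a :: rest) = true := by simp [List.isPrefixOf]
        rw [if_pos hpre]
        have hd : List.drop [a].length (a :: rest) = rest := by simp
        rw [hd]
        rw [ih rest [] ((cur.reverse) :: acc) (by simpa using Nat.lt_of_succ_lt_succ h)]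
        cases hs : split1 a rest with
        | nil => exact absurd hs (split1_ne_nil a rest)
        | cons x xs => simp [split1, hs]
      · have hpre : [c].isPrefixOf (a :: rest) = false := by
          simp [List.isPrefixOf]; exact fun hca => hac hca.symm
        rw [if_neg (by simp [hpre])]
        rw [ih rest (a :: cur) acc (by simpa using Nat.lt_of_succ_lt_succ h)]
        cases hs : split1 c rest with
        | nil => exact absurd hs (split1_ne_nil c rest)
        | cons x xs => simp [split1, hac, hs]

theorem splitOn_eq_split1 (c : Char) (l : List Char) :
    PySem.Chars.splitOn l [c] = split1 c l := by
  rw [PySem.Chars.splitOn, go_spec c (l.length + 1) l [] [] (by omega)]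
  cases hs : split1 c l with
  | nil => exact absurd hs (split1_ne_nil c l)
  | cons x xs => simp

theorem dropWhile_append_not (p : Char → Bool) (xs ys : List Char) (y : Char) (hy : ¬ p y = true) :
    List.dropWhile p (xs ++ y :: ys) = List.dropWhile p xs ++ y :: ys := by
  induction xs with
  | nil => simp [hy]
  | cons a l ih => by_cases h : p a <;> simp [h, ih]

theorem strip_eq_nil_iff (l : List Char) :
    PySem.Chars.strip l = [] ↔ (l.any fun ch => !PySem.Chars.isspace ch) = false := by
  have h1 : PySem.Chars.strip l = [] ↔ ∀ x ∈ List.dropWhile PySem.Chars.isspace l, PySem.Chars.isspace x = true := by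
    simp [PySem.Chars.strip, PySem.Chars.rstrip, PySem.Chars.lstrip, List.dropWhile_eq_nil_iff]
  rw [h1]
  simp only [List.any_eq_false, Bool.not_eq_true', Bool.not_eq_false]
  constructor
  · intro h x hx
    by_cases hd : x ∈ List.dropWhile PySem.Chars.isspace l
    · exact h x hd
    · have heq := List.takeWhile_append_dropWhile (p := PySem.Chars.isspace) (l := l)
      have hx' : x ∈ List.takeWhile PySem.Chars.isspace l ++ List.dropWhile PySem.Chars.isspace l := by
        rw [heq]; exact hx
      rcases List.mem_append.mp hx' with h' | h'
      · exact List.mem_takeWhile_imp h'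
      · exact absurd h' hd
  · intro h x hx
    exact h x ((List.dropWhile_sublist _).subset hx)

theorem isspace_colon : PySem.Chars.isspace ':' = false := by decide
theorem isspace_semi : PySem.Chars.isspace ';' = false := by decide

theorem strip_decomp (n t : List Char) :
    PySem.Chars.strip (n ++ ':' :: t)
      = PySem.Chars.lstrip n ++ ':' :: PySem.Chars.rstrip t := by
  have h1 : PySem.Chars.lstrip (n ++ ':' :: t) = PySem.Chars.lstrip n ++ ':' :: t := by
    simp only [PySem.Chars.lstrip]
    exact dropWhile_append_not _ _ _ _ (by simp [isspace_colon])
  simp only [PySem.Chars.strip, h1, PySem.Chars.rstrip]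
  have h2 : (PySem.Chars.lstrip n ++ ':' :: t).reverse
      = t.reverse ++ ':' :: (PySem.Chars.lstrip n).reverse := by
    simp
  rw [h2, dropWhile_append_not _ _ _ _ (by simp [isspace_colon])]
  simp

theorem lstrip_idem (l : List Char) :
    PySem.Chars.lstrip (PySem.Chars.lstrip l) = PySem.Chars.lstrip l := by
  simp only [PySem.Chars.lstrip]
  induction l with
  | nil => simp
  | cons a rest ih =>
    by_cases h : PySem.Chars.isspace a <;> simp [h, ih]

theorem strip_lstrip (l : List Char) :
    PySem.Chars.strip (PySem.Chars.lstrip l) = PySem.Chars.strip l := by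
  simp only [PySem.Chars.strip, lstrip_idem]

def segStep : (Nat × Bool × Bool) → Char → (Nat × Bool × Bool)
  | (cols, lft, rgt), ch =>
    if ch = ':' then (cols + 1, lft, rgt)
    else if !(PySem.Chars.isspace ch) then
      (cols, (if cols == 0 then true else lft), (if cols == 0 then rgt else true))
    else (cols, lft, rgt)

def foldSeg (st : Nat × Bool × Bool) (seg : List Char) : Nat × Bool × Bool := seg.foldl segStep st

def segOkS (st : Nat × Bool × Bool) : Bool := altSegOk st.1 st.2.1 st.2.2

def judge : List (List Char) → (Nat × Bool × Bool) → Bool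
  | [], _ => true
  | seg :: rest, st => segOkS (foldSeg st seg) && judge rest (0, false, false)

theorem altStep_ne_semi (ok ns : Bool) (st : Nat × Bool × Bool) (a : Char) (ha : a ≠ ';') :
    altStep (ok, ns, st.1, st.2.1, st.2.2) a
      = (ok, ns || !PySem.Chars.isspace a, (segStep st a).1, (segStep st a).2.1, (segStep st a).2.2) := by
  obtain ⟨c, lf, r⟩ := st
  simp only [altStep, segStep, if_neg ha]
  by_cases h1 : a = ':'
  · simp [h1, isspace_colon]
  · by_cases h2 : PySem.Chars.isspace a <;> simp [h1, h2]

theorem judge_modifyHead (a : Char) (segs : List (List Char)) (st : Nat × Bool × Bool)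
    (h : segs ≠ []) :
    judge (segs.modifyHead (a :: ·)) st = judge segs (segStep st a) := by
  cases segs with
  | nil => exact absurd rfl h
  | cons seg rest => simp [judge, foldSeg]

def finishB (s : Bool × Bool × Nat × Bool × Bool) : Bool :=
  (s.1 && altSegOk s.2.2.1 s.2.2.2.1 s.2.2.2.2) || !s.2.1

theorem foldB_spec : ∀ (l : List Char) (ok ns : Bool) (st : Nat × Bool × Bool),
    finishB (l.foldl altStep (ok, ns, st.1, st.2.1, st.2.2))
    = ((ok && judge (split1 ';' l) st) || !(ns || l.any fun ch => !PySem.Chars.isspace ch)) := by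
  intro l
  induction l with
  | nil =>
    intro ok ns st
    simp [split1, judge, foldSeg, segOkS, finishB]
  | cons a rest ih =>
    intro ok ns st
    by_cases ha : a = ';'
    · subst ha
      have hstep : altStep (ok, ns, st.1, st.2.1, st.2.2) ';'
          = (ok && altSegOk st.1 st.2.1 st.2.2, true, (0:Nat), false, false) := by
        simp [altStep]
      rw [List.foldl_cons, hstep]
      have h2 := ih (ok && altSegOk st.1 st.2.1 st.2.2) true (0, false, false)
      simp only at h2
      rw [h2]
      simp [split1, judge, segOkS, foldSeg, isspace_semi, Bool.and_assoc]
    · rw [List.foldl_cons, altStep_ne_semi ok ns st a ha]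
      have h2 := ih ok (ns || !PySem.Chars.isspace a) (segStep st a)
      rw [h2]
      simp only [split1, if_neg ha]
      rw [judge_modifyHead a _ st (split1_ne_nil ';' rest)]
      simp [Bool.or_assoc]

-- small list facts
theorem split1_of_not_mem (c : Char) (l : List Char) (h : c ∉ l) : split1 c l = [l] := by
  induction l with
  | nil => simp [split1]
  | cons a rest ih =>
    simp only [List.mem_cons, not_or] at h
    simp [split1, Ne.symm, h.1, ih h.2]

theorem split1_append (c : Char) (xs ys : List Char) (h : c ∉ xs) :
    split1 c (xs ++ c :: ys) = xs :: split1 c ys := by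
  induction xs with
  | nil => simp [split1]
  | cons a rest ih =>
    simp only [List.mem_cons, not_or] at h
    have ha : a ≠ c := fun h' => h.1 h'.symm
    simp [split1, ha, ih h.2]

theorem first_split (c : Char) (l : List Char) (h : c ∈ l) :
    ∃ n t, l = n ++ c :: t ∧ c ∉ n := by
  induction l with
  | nil => simp at h
  | cons a rest ih =>
    by_cases hac : a = c
    · exact ⟨[], rest, by simp [hac], by simp⟩
    · have h' : c ∈ rest := by
        rcases List.mem_cons.mp h with h1 | h1
        · exact absurd h1.symm hac
        · exact h1
      rcases ih h' with ⟨n, t, rfl, hn⟩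
      exact ⟨a :: n, t, rfl, by
        simp only [List.mem_cons, not_or]
        exact ⟨fun h'' => hac h''.symm, hn⟩⟩

theorem mem_dropWhile_of_not (p : Char → Bool) (x : Char) (l : List Char)
    (hp : ¬ p x = true) (h : x ∈ l) : x ∈ List.dropWhile p l := by
  induction l with
  | nil => simp at h
  | cons a rest ih =>
    by_cases ha : p a
    · rcases List.mem_cons.mp h with h' | h'
      · exact absurd (h' ▸ ha) hp
      · simpa [ha] using ih h'
    · simpa [ha] using h

theorem mem_rstrip_of_not (x : Char) (l : List Char)
    (hp : ¬ PySem.Chars.isspace x = true) (h : x ∈ l) : x ∈ PySem.Chars.rstrip l := by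
  simp only [PySem.Chars.rstrip, List.mem_reverse]
  exact mem_dropWhile_of_not _ _ _ hp (by simpa using h)

theorem strip_sublist (l : List Char) : (PySem.Chars.strip l).Sublist l := by
  have h1 : (PySem.Chars.lstrip l).Sublist l := List.dropWhile_sublist _
  have h2 : (PySem.Chars.rstrip (PySem.Chars.lstrip l)).Sublist (PySem.Chars.lstrip l) := by
    simp only [PySem.Chars.rstrip]
    have := List.dropWhile_sublist (p := PySem.Chars.isspace) (l := (PySem.Chars.lstrip l).reverse)
    simpa using this.reverse
  exact h2.trans h1

theorem any_ns_dropWhile (l : List Char) :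
    ((List.dropWhile PySem.Chars.isspace l).any fun ch => !PySem.Chars.isspace ch)
      = (l.any fun ch => !PySem.Chars.isspace ch) := by
  induction l with
  | nil => simp
  | cons a rest ih => by_cases h : PySem.Chars.isspace a <;> simp [h, ih]

theorem any_ns_rstrip (l : List Char) :
    ((PySem.Chars.rstrip l).any fun ch => !PySem.Chars.isspace ch)
      = (l.any fun ch => !PySem.Chars.isspace ch) := by
  simp only [PySem.Chars.rstrip, List.any_reverse]
  rw [any_ns_dropWhile]
  simp

-- foldSeg characterisations
theorem foldSeg_cols (seg : List Char) : ∀ (c : Nat) (lf r : Bool),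
    (foldSeg (c, lf, r) seg).1 = c + seg.count ':' := by
  induction seg with
  | nil => intro c lf r; simp [foldSeg]
  | cons a rest ih =>
    intro c lf r
    by_cases ha : a = ':'
    · subst ha
      have hstep : segStep (c, lf, r) ':' = (c + 1, lf, r) := by simp [segStep]
      simp only [foldSeg, List.foldl_cons, hstep]
      rw [show List.foldl segStep (c+1, lf, r) rest = foldSeg (c+1, lf, r) rest from rfl, ih]
      simp
      omega
    · have hstep : segStep (c, lf, r) a
          = (c, (if PySem.Chars.isspace a then lf else if c == 0 then true else lf),
              (if PySem.Chars.isspace a then r else if c == 0 then r else true)) := by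
        by_cases hs : PySem.Chars.isspace a <;> simp [segStep, ha, hs]
      simp only [foldSeg, List.foldl_cons, hstep]
      rw [show ∀ st, List.foldl segStep st rest = foldSeg st rest from fun _ => rfl, ih]
      simp [ha]

theorem foldSeg_no_colon_zero (seg : List Char) (h : ':' ∉ seg) : ∀ (lf r : Bool),
    foldSeg (0, lf, r) seg = (0, lf || (seg.any fun ch => !PySem.Chars.isspace ch), r) := by
  induction seg with
  | nil => intro lf r; simp [foldSeg]
  | cons a rest ih =>
    intro lf r
    simp only [List.mem_cons, not_or] at h
    have ha : a ≠ ':' := fun h' => h.1 h'.symm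
    by_cases hs : PySem.Chars.isspace a
    · have : segStep (0, lf, r) a = (0, lf, r) := by simp [segStep, ha, hs]
      simp only [foldSeg, List.foldl_cons, this]
      rw [show List.foldl segStep (0, lf, r) rest = foldSeg (0, lf, r) rest from rfl, ih h.2]
      simp [hs]
    · have : segStep (0, lf, r) a = (0, true, r) := by simp [segStep, ha, hs]
      simp only [foldSeg, List.foldl_cons, this]
      rw [show List.foldl segStep (0, true, r) rest = foldSeg (0, true, r) rest from rfl, ih h.2]
      simp [hs]

theorem foldSeg_no_colon_pos (seg : List Char) (h : ':' ∉ seg) : ∀ (c : Nat) (lf r : Bool), c ≠ 0 →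
    foldSeg (c, lf, r) seg = (c, lf, r || (seg.any fun ch => !PySem.Chars.isspace ch)) := by
  induction seg with
  | nil => intro c lf r _; simp [foldSeg]
  | cons a rest ih =>
    intro c lf r hc
    simp only [List.mem_cons, not_or] at h
    have ha : a ≠ ':' := fun h' => h.1 h'.symm
    by_cases hs : PySem.Chars.isspace a
    · have : segStep (c, lf, r) a = (c, lf, r) := by simp [segStep, ha, hs]
      simp only [foldSeg, List.foldl_cons, this]
      rw [show List.foldl segStep (c, lf, r) rest = foldSeg (c, lf, r) rest from rfl, ih h.2 c lf r hc]
      simp [hs]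
    · have hc' : (c == 0) = false := by simpa using hc
      have hstep : segStep (c, lf, r) a = (c, lf, true) := by simp [segStep, ha, hs, hc']
      simp only [foldSeg, List.foldl_cons, hstep]
      rw [show List.foldl segStep (c, lf, true) rest = foldSeg (c, lf, true) rest from rfl, ih h.2 c lf true hc]
      simp [hs]

def segA (p : String) : Bool :=
  let param := PySem.Str.strip p
  if PySem.Str.isIn ":" param = false then false
  else
    let parts := (PySem.Str.split? param ":").getD []
    if parts.length ≠ 2 then false
    else
      match parts with
      | [name, type_name] =>
        if PySem.Str.strip name = "" || PySem.Str.strip type_name = "" then false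
        else true
      | _ => false

theorem str_eq_empty_iff (s : String) : s = "" ↔ s.toList = [] := by
  constructor
  · rintro rfl; rfl
  · intro h
    have := congrArg String.ofList h
    simpa [String.ofList_toList] using this

theorem isIn_singleton (c : Char) (l : List Char) :
    PySem.Chars.isIn [c] l = true ↔ c ∈ l := by
  rw [PySem.Chars.isIn_iff_infix]
  constructor
  · intro h; exact h.mem (by simp)
  · intro h
    obtain ⟨s, t, rfl⟩ := List.append_of_mem h
    exact ⟨s, t, by simp⟩

theorem pyLoopA_eq_all (l : List String) : pyLoopA l = l.all segA := by
  induction l with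
  | nil => rfl
  | cons p rest ih =>
    rw [List.all_cons]
    rw [pyLoopA, segA]
    simp only
    generalize (PySem.Str.strip p) = param
    generalize ((PySem.Str.split? param ":").getD []) = parts
    by_cases h1 : PySem.Str.isIn ":" param = false
    · rw [if_pos h1, if_pos h1]; simp
    · rw [if_neg h1, if_neg h1]
      by_cases h2 : parts.length ≠ 2
      · rw [if_pos h2, if_pos h2]; simp
      · rw [if_neg h2, if_neg h2]
        simp only [not_not, List.length_eq_two] at h2
        obtain ⟨x, y, rfl⟩ := h2
        by_cases h3 : PySem.Str.strip x = "" ∨ PySem.Str.strip y = ""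
        · have h3' : (PySem.Str.strip x = "" || PySem.Str.strip y = "") = true := by
            simpa [decide_eq_true_eq] using h3
          simp [h3']
        · have h3' : (PySem.Str.strip x = "" || PySem.Str.strip y = "") = false := by
            simpa [decide_eq_true_eq] using h3
          simp [h3', ih]

theorem judge_eq_all (segs : List (List Char)) :
    judge segs (0, false, false) = segs.all fun seg => segOkS (foldSeg (0, false, false) seg) := by
  induction segs with
  | nil => rfl
  | cons seg rest ih => simp [judge, ih]

theorem segA_eq_segB (seg : List Char) :
    segA (String.ofList seg) = segOkS (foldSeg (0, false, false) seg) := by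
  rw [segA]
  simp only [PySem.Str.strip, PySem.Str.isIn, PySem.Str.split?, String.toList_ofList,
    show (":" : String).toList = [':'] from rfl]
  by_cases hmem : ':' ∈ seg
  · obtain ⟨n, t, rfl, hn⟩ := first_split ':' seg hmem
    have hq2 : PySem.Chars.strip (n ++ ':' :: t)
        = PySem.Chars.lstrip n ++ ':' :: PySem.Chars.rstrip t := strip_decomp n t
    have hnl : ':' ∉ PySem.Chars.lstrip n :=
      fun h => hn ((List.dropWhile_sublist _).subset h)
    have hin : PySem.Chars.isIn [':'] (PySem.Chars.strip (n ++ ':' :: t)) = true := by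
      rw [isIn_singleton, hq2]; simp
    rw [hq2] at hin ⊢
    rw [if_neg (by simp [hin])]
    have hsplit? : PySem.Chars.split? (PySem.Chars.lstrip n ++ ':' :: PySem.Chars.rstrip t) [':']
        = some (split1 ':' (PySem.Chars.lstrip n ++ ':' :: PySem.Chars.rstrip t)) := by
      simp [PySem.Chars.split?, splitOn_eq_split1]
    rw [hsplit?]
    rw [split1_append ':' _ _ hnl]
    have hcols := foldSeg_cols (n ++ ':' :: t) 0 false false
    by_cases hmt : ':' ∈ t
    · -- more than one colon: both sides false
      have hmrt : ':' ∈ PySem.Chars.rstrip t := mem_rstrip_of_not ':' t (by simp [isspace_colon]) hmt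
      obtain ⟨n2, t2, hrt, hn2⟩ := first_split ':' (PySem.Chars.rstrip t) hmrt
      rw [hrt, split1_append ':' _ _ hn2]
      have hlen : (List.map String.ofList
          (PySem.Chars.lstrip n :: n2 :: split1 ':' t2)).length ≠ 2 := by
        have := split1_ne_nil ':' t2
        cases hs : split1 ':' t2 with
        | nil => exact absurd hs this
        | cons z zs => simp
      simp only [Option.map_some, Option.getD_some]
      rw [if_pos hlen]
      have hct : 0 < t.count ':' := List.count_pos_iff.mpr hmt
      have hc1 : (foldSeg (0, false, false) (n ++ ':' :: t)).1 ≠ 1 := by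
        rw [hcols]
        simp [List.count_append]
        omega
      simp only [segOkS, altSegOk]
      have : ((foldSeg (0, false, false) (n ++ ':' :: t)).1 == 1) = false := by
        simpa using hc1
      simp [this]
    · -- exactly one colon: the real case
      have hrt : ':' ∉ PySem.Chars.rstrip t := by
        intro h
        simp only [PySem.Chars.rstrip, List.mem_reverse] at h
        exact hmt (List.mem_reverse.mp ((List.dropWhile_sublist _).subset h))
      rw [split1_of_not_mem ':' _ hrt]
      simp only [Option.map_some, Option.getD_some]
      rw [if_neg (by simp)]
      have e1 : (String.ofList (PySem.Chars.strip ((String.ofList (PySem.Chars.lstrip n)).toList)) = "")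
          ↔ ((n.any fun ch => !PySem.Chars.isspace ch) = false) := by
        rw [str_eq_empty_iff]
        simp only [String.toList_ofList, strip_lstrip]
        exact strip_eq_nil_iff n
      have e2 : (String.ofList (PySem.Chars.strip ((String.ofList (PySem.Chars.rstrip t)).toList)) = "")
          ↔ ((t.any fun ch => !PySem.Chars.isspace ch) = false) := by
        rw [str_eq_empty_iff]
        simp only [String.toList_ofList]
        rw [strip_eq_nil_iff, any_ns_rstrip]
      have hfold : foldSeg (0, false, false) (n ++ ':' :: t)
          = (1, (n.any fun ch => !PySem.Chars.isspace ch), (t.any fun ch => !PySem.Chars.isspace ch)) := by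
        rw [foldSeg, List.foldl_append]
        rw [show List.foldl segStep (0, false, false) n = foldSeg (0, false, false) n from rfl,
          foldSeg_no_colon_zero n hn]
        rw [List.foldl_cons]
        have hstep : segStep (0, false || (n.any fun ch => !PySem.Chars.isspace ch), false) ':'
            = (1, (false || (n.any fun ch => !PySem.Chars.isspace ch)), false) := by
          simp [segStep]
        rw [hstep]
        rw [show ∀ st, List.foldl segStep st t = foldSeg st t from fun _ => rfl,
          foldSeg_no_colon_pos t hmt 1 _ false (by omega)]
        simp
      rw [hfold]
      simp only [segOkS, altSegOk]
      have g1 : PySem.Chars.strip (PySem.Chars.lstrip n) = [] ↔ ((n.any fun ch => !PySem.Chars.isspace ch) = false) := by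
        rw [strip_lstrip]; exact strip_eq_nil_iff n
      have g2 : PySem.Chars.strip (PySem.Chars.rstrip t) = [] ↔ ((t.any fun ch => !PySem.Chars.isspace ch) = false) := by
        rw [strip_eq_nil_iff, any_ns_rstrip]
      cases hna : (n.any fun ch => !PySem.Chars.isspace ch)
        <;> cases hta : (t.any fun ch => !PySem.Chars.isspace ch)
        <;> simp [g1, g2, hna, hta]
  · -- no colon at all: both sides false
    have h1 : ':' ∉ PySem.Chars.strip seg := fun h => hmem ((strip_sublist seg).subset h)
    have h2 : PySem.Chars.isIn [':'] (PySem.Chars.strip seg) = false := by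
      cases hb : PySem.Chars.isIn [':'] (PySem.Chars.strip seg) with
      | false => rfl
      | true => exact absurd ((isIn_singleton _ _).mp hb) h1
    rw [if_pos (by simp [h2])]
    have hc := foldSeg_cols seg 0 false false
    rw [List.count_eq_zero_of_not_mem hmem] at hc
    simp only [segOkS, altSegOk]
    have : ((foldSeg (0, false, false) seg).1 == 1) = false := by simp [hc]
    simp [this]

theorem all_segA (segs : List (List Char)) :
    segs.all (segA ∘ String.ofList)
      = segs.all fun seg => segOkS (foldSeg (0, false, false) seg) := by
  induction segs with
  | nil => simp only [List.all_nil]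
  | cons seg rest ih =>
    simp only [List.all_cons, ih, Function.comp_apply, segA_eq_segB]

set_option maxHeartbeats 1000000 in
theorem main_equal (parameters : String) :
    validate_parameters_format_py parameters = validate_parameters_format_py_alt parameters := by
  have halt : validate_parameters_format_py_alt parameters
      = finishB (parameters.toList.foldl altStep (true, false, 0, false, false)) := by
    rw [validate_parameters_format_py_alt]
    rcases h : parameters.toList.foldl altStep (true, false, 0, false, false) with ⟨ok, ns, c, lf, r⟩
    simp [finishB]
  have hspec := foldB_spec parameters.toList true false (0, false, false)
  simp only at hspec
  rw [halt, hspec]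
  have hempty : (PySem.Str.strip parameters = "")
      ↔ ((parameters.toList.any fun ch => !PySem.Chars.isspace ch) = false) := by
    rw [str_eq_empty_iff, PySem.Str.toList_strip]
    exact strip_eq_nil_iff _
  rw [validate_parameters_format_py]
  by_cases hany : (parameters.toList.any fun ch => !PySem.Chars.isspace ch) = false
  · rw [if_pos (hempty.mpr hany), hany]
    simp
  · rw [if_neg (fun h => hany (hempty.mp h))]
    have hany' : (parameters.toList.any fun ch => !PySem.Chars.isspace ch) = true := by
      simpa using hany
    rw [hany']
    have hsplit : (PySem.Str.split? parameters ";").getD []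
        = (split1 ';' parameters.toList).map String.ofList := by
      simp [PySem.Str.split?, PySem.Chars.split?, splitOn_eq_split1,
        show (";" : String).toList = [';'] from rfl]
    rw [hsplit, pyLoopA_eq_all, List.all_map, judge_eq_all]
    rw [all_segA]
    simp

-- ===== VERDICT (by name: the statement is the Claim_ definition above) =====
theorem validate_parameters_format_py_spec : Claim_equal_validate_parameters_format_py := by
  intro parameters _
  unfold Spec_validate_parameters_format_py
  exact main_equal parameters
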